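-- pv_equiv track=rewrite | github.com/dnlkvnsts/igi_lab2 | tasks/task4.py | find_words_with_two_consecutive_letter_with_their_order
-- ===== SOURCE A (Python) =====
-- def find_words_with_two_consecutive_letter_with_their_order(words_in_text):
--     """
--     Finds words that have two identical letters in a row.
--
--     Args:
--         words_in_text (list): A list of words.
--
--     Returns:
--         list: A list of tuples containing the word's position and the word itself.
--     """
--     words_with_two_consecutive_letter_with_their_order=[]
--
--     for index, word in enumerate(words_in_text, 1):
--         low_word=word.lower()
--         for i in range(len(low_word)-1):
--             if low_word[i] == low_word[i+1]:
--                 words_with_two_consecutive_letter_with_their_order.append((index, word))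
--                 break
--     return words_with_two_consecutive_letter_with_their_order
-- ===== SOURCE B (Python) =====
-- def find_words_with_two_consecutive_letter_with_their_order(words_in_text):
--     # Different algorithm: instead of scanning positions pairwise, test for each
--     # DISTINCT character of the lowercased word whether its doubled bigram
--     # occurs as a substring ("c+c in low"). Order of iteration over the set is
--     # irrelevant because any() only yields a bool.
--     result = []
--     for index, word in enumerate(words_in_text, 1):
--         low = word.lower()
--         if any(c + c in low for c in set(low)):
--             result.append((index, word))
--     return result
-- ===== Notes on version B (the rewrite author's own statement) =====
-- stated objective: alternative
-- what changed: Replaces A's positional adjacent-pair scan with break by a per-distinct-character substring test: a word qualifies iff some character c of set(word.lower()) has its doubled bigram c+c occurring as a substring.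
import Mathlib
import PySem

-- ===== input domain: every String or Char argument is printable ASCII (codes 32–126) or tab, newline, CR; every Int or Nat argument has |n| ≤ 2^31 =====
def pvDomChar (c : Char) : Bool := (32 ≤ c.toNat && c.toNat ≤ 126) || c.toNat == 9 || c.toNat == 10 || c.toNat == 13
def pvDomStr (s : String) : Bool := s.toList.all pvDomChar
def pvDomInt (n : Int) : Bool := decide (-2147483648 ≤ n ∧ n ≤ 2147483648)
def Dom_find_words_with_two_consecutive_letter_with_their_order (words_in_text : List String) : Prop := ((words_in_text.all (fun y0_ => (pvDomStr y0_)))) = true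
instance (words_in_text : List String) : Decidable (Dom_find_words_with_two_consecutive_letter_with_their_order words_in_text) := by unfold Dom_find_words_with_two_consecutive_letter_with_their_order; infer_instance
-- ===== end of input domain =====

-- B replaces A's positional adjacent-pair scan (index loop with break) by a
-- per-distinct-character substring test: c+c occurs in the lowercased word for
-- some c in set(word.lower()) (objective: alternative; same result, not faster).

-- ===== PORT A =====
-- inner loop: `for i in range(len(low_word)-1): if low_word[i]==low_word[i+1]: …; break`
def aScan (cs : List Char) (i : Nat) : Bool :=
  if h : i < cs.length - 1 then
    if cs[i]! == cs[i+1]! then true else aScan cs (i+1)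
  else false
termination_by cs.length - 1 - i

def find_words_with_two_consecutive_letter_with_their_order (words_in_text : List String) : List (Int × String) :=
  (PySem.List.enumerate words_in_text 1).foldl
    (fun acc p =>
      let low_word := PySem.Str.lower p.2
      if aScan low_word.toList 0 then acc ++ [p] else acc) []

-- ===== PORT B =====
-- `any(c + c in low for c in set(low))`
def bHasDouble (word : String) : Bool :=
  let low := (PySem.Str.lower word).toList
  (PySem.Set.ofList low).any (fun c => PySem.Chars.isIn [c, c] low)

def find_words_with_two_consecutive_letter_with_their_order_alt (words_in_text : List String) : List (Int × String) :=
  (PySem.List.enumerate words_in_text 1).foldl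
    (fun result p => if bHasDouble p.2 then result ++ [p] else result) []

-- ===== PRECONDITION & SPEC =====
def Spec_find_words_with_two_consecutive_letter_with_their_order (words_in_text : List String) (out : List (Int × String)) : Prop := out = find_words_with_two_consecutive_letter_with_their_order_alt words_in_text
instance (words_in_text : List String) (out : List (Int × String)) : Decidable (Spec_find_words_with_two_consecutive_letter_with_their_order words_in_text out) := by unfold Spec_find_words_with_two_consecutive_letter_with_their_order; infer_instance

-- ===== CLAIM (what is proved, stated in full; the proofs are below) =====
def Claim_equal_find_words_with_two_consecutive_letter_with_their_order : Prop := ∀ (words_in_text : List String), Dom_find_words_with_two_consecutive_letter_with_their_order words_in_text → Spec_find_words_with_two_consecutive_letter_with_their_order words_in_text (find_words_with_two_consecutive_letter_with_their_order words_in_text)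

-- ===== LEMMAS AND PROOFS =====
-- structural reformulation of "some adjacent pair equal"
def pairScan : List Char → Bool
  | a :: b :: t => a == b || pairScan (b :: t)
  | _ => false

theorem aScan_eq_pairScan (cs : List Char) (i : Nat) :
    aScan cs i = pairScan (cs.drop i) := by
  fun_induction aScan cs i with
  | case1 i h heq =>
    have h1 : i < cs.length := by omega
    have h2 : i + 1 < cs.length := by omega
    rw [List.drop_eq_getElem_cons h1, List.drop_eq_getElem_cons h2]
    rw [getElem!_pos cs i h1, getElem!_pos cs (i+1) h2] at heq
    simp [pairScan, heq]
  | case2 i h heq ih =>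
    have h1 : i < cs.length := by omega
    have h2 : i + 1 < cs.length := by omega
    rw [List.drop_eq_getElem_cons h1]
    rw [getElem!_pos cs i h1, getElem!_pos cs (i+1) h2] at heq
    rw [ih, List.drop_eq_getElem_cons h2]
    simp [pairScan, heq]
  | case3 i h =>
    match hd : cs.drop i with
    | [] => simp [pairScan]
    | [a] => simp [pairScan]
    | a :: b :: t =>
      exfalso
      have := congrArg List.length hd
      simp at this
      omega

theorem pairScan_iff (cs : List Char) :
    pairScan cs = true ↔ ∃ c, [c, c] <:+: cs := by
  fun_induction pairScan cs with
  | case1 a b t ih =>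
    simp only [Bool.or_eq_true, beq_iff_eq, ih]
    constructor
    · rintro (rfl | ⟨c, hc⟩)
      · exact ⟨a, [], t, by simp⟩
      · exact ⟨c, hc.trans (List.suffix_cons a (b :: t)).isInfix⟩
    · rintro ⟨c, hc⟩
      rcases List.infix_cons_iff.1 hc with hp | hi
      · rcases List.cons_prefix_cons.1 hp with ⟨rfl, hp2⟩
        rcases List.cons_prefix_cons.1 hp2 with ⟨rfl, _⟩
        exact Or.inl rfl
      · exact Or.inr ⟨c, hi⟩
  | case2 x hx =>
    rcases x with _ | ⟨a, _ | ⟨b, t⟩⟩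
    · exact iff_of_false (by simp) (by rintro ⟨c, hc⟩; simpa using hc.length_le)
    · exact iff_of_false (by simp) (by rintro ⟨c, hc⟩; simpa using hc.length_le)
    · exact absurd rfl (hx a b t)

theorem bHasDouble_iff (cs : List Char) :
    ((PySem.Set.ofList cs).any (fun c => PySem.Chars.isIn [c, c] cs)) = true ↔
      ∃ c, [c, c] <:+: cs := by
  rw [List.any_eq_true]
  constructor
  · rintro ⟨c, _, hc⟩
    exact ⟨c, (PySem.Chars.isIn_iff_infix _ _).1 hc⟩
  · rintro ⟨c, hc⟩
    refine ⟨c, ?_, (PySem.Chars.isIn_iff_infix _ _).2 hc⟩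
    rw [PySem.Set.mem_ofList]
    exact hc.subset (by simp)

theorem test_eq (w : String) :
    aScan (PySem.Str.lower w).toList 0 = bHasDouble w := by
  rw [bHasDouble, Bool.eq_iff_iff, aScan_eq_pairScan, List.drop_zero, pairScan_iff]
  simpa using (bHasDouble_iff (PySem.Str.lower w).toList).symm

-- ===== VERDICT (by name: the statement is the Claim_ definition above) =====
theorem find_words_with_two_consecutive_letter_with_their_order_spec : Claim_equal_find_words_with_two_consecutive_letter_with_their_order := by
  intro ws _
  show _ = _
  rw [find_words_with_two_consecutive_letter_with_their_order,
      find_words_with_two_consecutive_letter_with_their_order_alt]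
  simp only [test_eq]
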